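-- pv_equiv track=rewrite | github.com/nlimpert/crosscut | _extension/rosin/ros_element.py | divide_parts
-- ===== SOURCE A (Python) =====
-- from typing import Dict, List, Tuple
--
-- def divide_parts(parts: List[str], texts: List[str]) -> List[str]:
--     if len(texts) == 0 or len(parts) == 0 or texts[0] == 'short':
--         return []
--
--     texts_without_short: List[str] = [text
--                                       for text in texts
--                                       if text != 'short']
--
--     role_with_texts: str = ':ros:%s:`%s`' % (parts[0],
--                                              ' '.join(texts_without_short))
--
--     return divide_parts(parts[1:], texts[1:]) + [role_with_texts]
-- ===== SOURCE B (Python) =====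
-- def divide_parts(parts, texts):
--     # iterative: find the cutoff level k, then build the levels back-to-front
--     k = 0
--     while k < len(parts) and k < len(texts) and texts[k] != 'short':
--         k += 1
--     out = []
--     for i in range(k - 1, -1, -1):
--         out.append(':ros:%s:`%s`' % (parts[i],
--                                      ' '.join(t for t in texts[i:] if t != 'short')))
--     return out
-- ===== Notes on version B (the rewrite author's own statement) =====
-- stated objective: alternative
-- what changed: Replaces the recursion (which prepends the recursive result before each level's string) with an explicit loop: first find the cutoff index k, then build the k level strings back-to-front by index, so no list concatenations or recursive calls are needed.
import Mathlib
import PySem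

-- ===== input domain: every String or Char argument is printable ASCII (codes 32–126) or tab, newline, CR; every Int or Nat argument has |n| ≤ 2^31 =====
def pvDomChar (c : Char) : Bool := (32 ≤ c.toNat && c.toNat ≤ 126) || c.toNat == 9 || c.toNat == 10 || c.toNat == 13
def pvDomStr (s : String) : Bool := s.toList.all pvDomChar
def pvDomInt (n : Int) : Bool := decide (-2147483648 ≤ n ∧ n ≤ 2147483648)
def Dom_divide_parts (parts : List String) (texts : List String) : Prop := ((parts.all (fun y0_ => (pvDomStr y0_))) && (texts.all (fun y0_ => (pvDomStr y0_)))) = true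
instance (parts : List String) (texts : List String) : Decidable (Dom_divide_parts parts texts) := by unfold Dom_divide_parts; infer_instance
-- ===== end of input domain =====

-- B replaces A's recursion by an explicit cutoff-index scan plus an index loop that
-- builds the level strings back-to-front (alternative decomposition, same cost class).

-- ===== PORT A =====
-- literal transliteration of the Python recursion
def divide_parts (parts : List String) (texts : List String) : List String :=
  match parts, texts with
  | [], _ => []
  | _ :: _, [] => []
  | p :: ps, t :: ts =>
    if t = "short" then []
    else
      let texts_without_short := (t :: ts).filter (fun x => x ≠ "short")
      let role_with_texts := ":ros:" ++ p ++ ":`" ++ PySem.Str.join " " texts_without_short ++ "`"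
      divide_parts ps ts ++ [role_with_texts]

-- ===== PORT B =====
-- the while-loop of Source B: first index i with i ≥ len(parts), i ≥ len(texts) or texts[i] = 'short'
def findCut : List String → List String → Nat
  | _ :: ps, t :: ts => if t = "short" then 0 else 1 + findCut ps ts
  | _, _ => 0

-- the loop body's string for level i
def roleAt (parts : List String) (texts : List String) (i : Nat) : String :=
  ":ros:" ++ parts.getD i "" ++ ":`"
    ++ PySem.Str.join " " ((texts.drop i).filter (fun x => x ≠ "short")) ++ "`"

def divide_parts_alt (parts : List String) (texts : List String) : List String :=
  let k := findCut parts texts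
  ((List.range k).reverse).foldl (fun out i => out ++ [roleAt parts texts i]) []

-- ===== PRECONDITION & SPEC =====
def Spec_divide_parts (parts : List String) (texts : List String) (out : List String) : Prop := out = divide_parts_alt parts texts
instance (parts : List String) (texts : List String) (out : List String) : Decidable (Spec_divide_parts parts texts out) := by unfold Spec_divide_parts; infer_instance

-- ===== CLAIM (what is proved, stated in full; the proofs are below) =====
def Claim_equal_divide_parts : Prop := ∀ (parts : List String) (texts : List String), Dom_divide_parts parts texts → Spec_divide_parts parts texts (divide_parts parts texts)

-- ===== LEMMAS AND PROOFS =====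

theorem roleAt_succ (p : String) (ps : List String) (t : String) (ts : List String) (i : Nat) :
    roleAt (p :: ps) (t :: ts) (i + 1) = roleAt ps ts i := by
  simp [roleAt]

theorem divide_parts_eq_map (parts texts : List String) :
    divide_parts parts texts
      = ((List.range (findCut parts texts)).reverse).map (roleAt parts texts) := by
  induction parts generalizing texts with
  | nil => simp [divide_parts, findCut]
  | cons p ps ih =>
    cases texts with
    | nil => simp [divide_parts, findCut]
    | cons t ts =>
      by_cases h : t = "short"
      · simp [divide_parts, findCut, h]
      · rw [show divide_parts (p :: ps) (t :: ts)
              = divide_parts ps ts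
                ++ [":ros:" ++ p ++ ":`"
                    ++ PySem.Str.join " " ((t :: ts).filter (fun x => x ≠ "short")) ++ "`"]
            from by simp [divide_parts, h]]
        rw [show findCut (p :: ps) (t :: ts) = findCut ps ts + 1 from by
              simp [findCut, h, Nat.add_comm]]
        rw [List.range_succ_eq_map, ih ts]
        simp only [List.reverse_cons, List.map_append, List.map_cons, List.map_nil,
          List.map_reverse, List.map_map]
        rw [← List.map_reverse]
        congr 1
        rw [← List.map_reverse]
        apply List.map_congr_left
        intro i _
        exact (roleAt_succ p ps t ts i).symm

-- ===== VERDICT (by name: the statement is the Claim_ definition above) =====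
theorem divide_parts_spec : Claim_equal_divide_parts := by
  intro parts texts _
  unfold Spec_divide_parts divide_parts_alt
  rw [PySem.List.foldl_append_singleton_eq_map, List.nil_append]
  exact divide_parts_eq_map parts texts
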